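-- pv_equiv track=rewrite | github.com/atom015/py_boj | 1000번/1124_언더프라임.py | under_prime
-- ===== SOURCE A (Python) =====
-- def sosu(n):
--     a = [False,False] + [True]*(n-1)
--     primes=[]
--
--     for i in range(2,n+1):
--       if a[i]:
--         primes.append(i)
--         for j in range(2*i, n+1, i):
--             a[j] = False
--     if n in primes:
--         return True
--
-- def under_prime(n):
--     cnt = 0
--     i = 2
--     while i*i <= n:
--         while n % i == 0:
--             cnt += 1
--             n //=i
--         i += 1
--     if n > 1:
--         cnt += 1
--     if sosu(cnt):
--         return True
-- ===== SOURCE B (Python) =====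
-- def _omega(n):
--     # number of prime factors with multiplicity, single flat loop
--     d = 2
--     cnt = 0
--     while d * d <= n:
--         if n % d == 0:
--             cnt += 1
--             n //= d
--         else:
--             d += 1
--     return cnt + (1 if n > 1 else 0)
--
--
-- def _is_prime(k):
--     d = 2
--     while d * d <= k:
--         if k % d == 0:
--             return False
--         d += 1
--     return k > 1
--
--
-- def under_prime(n):
--     if _is_prime(_omega(n)):
--         return True
-- ===== Notes on version B (the rewrite author's own statement) =====
-- stated objective: simpler
-- what changed: Replaced the nested two-while factor loop by a single flat loop that divides or advances one step per iteration, and replaced the sieve-of-Eratosthenes primality check of the factor count (list building + membership scan) by a direct trial-division primality test returning a plain boolean.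
import Mathlib
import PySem

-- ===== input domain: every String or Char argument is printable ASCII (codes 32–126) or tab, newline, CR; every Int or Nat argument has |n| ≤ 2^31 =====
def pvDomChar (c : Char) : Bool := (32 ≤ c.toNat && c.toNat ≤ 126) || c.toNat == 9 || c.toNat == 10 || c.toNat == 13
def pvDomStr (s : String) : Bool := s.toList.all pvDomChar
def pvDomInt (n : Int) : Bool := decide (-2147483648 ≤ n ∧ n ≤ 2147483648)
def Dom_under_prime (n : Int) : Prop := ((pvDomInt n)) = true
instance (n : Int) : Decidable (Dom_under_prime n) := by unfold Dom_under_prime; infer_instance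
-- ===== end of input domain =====

-- B replaces A's nested factor loops by one flat divide-or-advance loop and A's sieve primality
-- check of the count by direct trial division (objective: simpler).
-- Loops are ported with a Nat fuel parameter that only makes the recursion total: the fuel
-- passed at each call site strictly dominates the loop's measure, so the 0-fuel branch is
-- never reached (the lemmas below never use it on a reachable state).

-- ===== PORT A =====

-- inner `while n % i == 0` loop of A
def innerA : Nat → Int → Int → Int → Int × Int
  | 0, _, n, cnt => (n, cnt)
  | f + 1, i, n, cnt =>
    if PySem.Int.mod n i = 0 then innerA f i (PySem.Int.floordiv n i) (cnt + 1)
    else (n, cnt)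

-- outer `while i*i <= n` loop of A
def outerA : Nat → Int → Int → Int → Int × Int
  | 0, _, n, cnt => (n, cnt)
  | f + 1, i, n, cnt =>
    if i * i ≤ n then
      let p := innerA (n.toNat + 1) i n cnt
      outerA f (i + 1) p.1 p.2
    else (n, cnt)

-- A's sieve helper: sosu(n)
def sosu (n : Int) : Option Bool :=
  let a : List Bool := [false, false] ++ List.replicate (n - 1).toNat true
  let st : List Bool × List Int :=
    (PySem.List.pyRange 2 (n + 1) 1).foldl
      (fun st i =>
        if PySem.List.pyGet? st.1 i = some true then
          -- `a[j] = False` for j in range(2*i, n+1, i); j ≥ 0 here so `.set j.toNat` is Python's a[j]=False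
          ((PySem.List.pyRange (2 * i) (n + 1) i).foldl (fun a j => a.set j.toNat false) st.1,
           st.2 ++ [i])
        else st)
      (a, [])
  if st.2.contains n then some true else none

def under_prime (n : Int) : Option Bool :=
  let p := outerA (n.toNat + 1) 2 n 0
  let cnt := if 1 < p.1 then p.2 + 1 else p.2
  if sosu cnt = some true then some true else none

-- ===== PORT B =====

-- flat loop of B's _omega
def omegaB : Nat → Int → Int → Int → Int
  | 0, n, _, cnt => cnt + (if 1 < n then 1 else 0)
  | f + 1, n, d, cnt =>
    if d * d ≤ n then
      if PySem.Int.mod n d = 0 then omegaB f (PySem.Int.floordiv n d) d (cnt + 1)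
      else omegaB f n (d + 1) cnt
    else cnt + (if 1 < n then 1 else 0)

-- B's _is_prime trial-division loop
def isPrimeB : Nat → Int → Int → Bool
  | 0, k, _ => decide (1 < k)
  | f + 1, k, d =>
    if d * d ≤ k then
      if PySem.Int.mod k d = 0 then false else isPrimeB f k (d + 1)
    else decide (1 < k)

def under_prime_alt (n : Int) : Option Bool :=
  let c := omegaB (n.toNat + 1) n 2 0
  if isPrimeB (c.toNat + 1) c 2 then some true else none

-- ===== PRECONDITION & SPEC =====
def Spec_under_prime (n : Int) (out : Option Bool) : Prop := out = under_prime_alt n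
instance (n : Int) (out : Option Bool) : Decidable (Spec_under_prime n out) := by unfold Spec_under_prime; infer_instance

-- ===== CLAIM (what is proved, stated in full; the proofs are below) =====
def Claim_equal_under_prime : Prop := ∀ (n : Int), Dom_under_prime n → Spec_under_prime n (under_prime n)

-- ===== LEMMAS AND PROOFS =====

-- A's count after the loops, including the final `if n > 1: cnt += 1`
def afinA (f : Nat) (i n cnt : Int) : Int :=
  (outerA f i n cnt).2 + (if 1 < (outerA f i n cnt).1 then 1 else 0)

-- "n has no divisor in [2, d)"
def noSmallDiv (n d : Int) : Prop := ∀ e : Int, 2 ≤ e → e < d → ¬ (e ∣ n)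

theorem ediv_pos_lt (n i : Int) (hi : 2 ≤ i) (hn : 0 < n) (hdvd : i ∣ n) :
    0 < n / i ∧ n / i < n := by
  have h4 := Int.emod_nonneg n (by omega : i ≠ 0)
  have h5 := Int.emod_lt_of_pos n (by omega : (0:Int) < i)
  have h6 := Int.mul_ediv_add_emod n i
  have h7 : n % i = 0 := Int.emod_eq_zero_of_dvd hdvd
  constructor <;> nlinarith

-- a divisor of n/i divides n, when i ∣ n
theorem dvd_of_dvd_ediv {e n i : Int} (hdvd : i ∣ n) (h : e ∣ n / i) : e ∣ n :=
  dvd_trans h ⟨i, (Int.ediv_mul_cancel hdvd).symm⟩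

-- with no divisor in [2, d): if d ∣ n and 0 < n < d*d then n = d
theorem eq_of_no_small_div (n d : Int) (hd : 2 ≤ d) (hn : 0 < n) (hlt : n < d * d)
    (hdvd : d ∣ n) (hns : noSmallDiv n d) : n = d := by
  obtain ⟨k, hk⟩ := hdvd
  have hk1 : 0 < k := by nlinarith
  have hk2 : k < d := by nlinarith
  have hk3 : k = 1 := by
    by_contra hne
    exact hns k (by omega) hk2 ⟨d, by linarith [hk]⟩
  simp [hk, hk3]

-- innerA does not depend on the fuel once the fuel dominates n
theorem innerA_stable (f : Nat) : ∀ (g : Nat) (n cnt i : Int), 2 ≤ i → 0 < n →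
    n.toNat < f → n.toNat < g → innerA f i n cnt = innerA g i n cnt := by
  induction f with
  | zero => intro g n cnt i _ _ hf _; omega
  | succ f ihf =>
    intro g n cnt i hi hn hf hg
    obtain ⟨g', rfl⟩ : ∃ g', g = g' + 1 := ⟨g - 1, by omega⟩
    simp only [innerA]
    by_cases hm : PySem.Int.mod n i = 0
    · rw [if_pos hm, if_pos hm]
      have hdvd : i ∣ n := (PySem.Int.mod_eq_zero_iff_dvd n i).mp hm
      have hq := ediv_pos_lt n i hi hn hdvd
      have hfd : PySem.Int.floordiv n i = n / i := PySem.Int.floordiv_eq_ediv_of_pos (by omega)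
      rw [hfd]
      exact ihf g' (n / i) (cnt + 1) i hi hq.1 (by omega) (by omega)
    · rw [if_neg hm, if_neg hm]

-- the loop starting at state n = i with fresh-enough fuel strips exactly one factor
theorem innerA_self (f : Nat) (d cnt : Int) (hd : 2 ≤ d) (hf : d.toNat < f) :
    innerA f d d cnt = (1, cnt + 1) := by
  obtain ⟨f', rfl⟩ : ∃ f', f = f' + 1 := ⟨f - 1, by omega⟩
  have hm : PySem.Int.mod d d = 0 := (PySem.Int.mod_eq_zero_iff_dvd d d).mpr dvd_rfl
  have hfd : PySem.Int.floordiv d d = 1 := by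
    rw [PySem.Int.floordiv_eq_ediv_of_pos (by omega), Int.ediv_self (by omega)]
  obtain ⟨f'', rfl⟩ : ∃ f'', f' = f'' + 1 := ⟨f' - 1, by omega⟩
  simp only [innerA, if_pos hm, hfd]
  have hm1 : ¬ PySem.Int.mod 1 d = 0 := by
    intro hc
    have := Int.le_of_dvd (by omega) ((PySem.Int.mod_eq_zero_iff_dvd 1 d).mp hc)
    omega
  rw [if_neg hm1]

-- MAIN LEMMA: A's nested loops compute exactly B's flat loop (fuel dominating the measure)
theorem afin_eq_omega (fb : Nat) : ∀ (fo : Nat) (n d cnt : Int), 2 ≤ d → noSmallDiv n d →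
    (n + 2 - d).toNat < fo → (n + 2 - d).toNat < fb → afinA fo d n cnt = omegaB fb n d cnt := by
  induction fb with
  | zero => intro fo n d cnt _ _ _ hfb; omega
  | succ fb ihb =>
    intro fo n d cnt hd hns hfo hfb
    obtain ⟨fo', rfl⟩ : ∃ k, fo = k + 1 := ⟨fo - 1, by omega⟩
    by_cases hdd : d * d ≤ n
    · have hdle : d ≤ d * d := by nlinarith [sq_nonneg (d - 1)]
      have hn : 0 < n := by nlinarith
      by_cases hm : PySem.Int.mod n d = 0
      · -- divide step
        have hdvd : d ∣ n := (PySem.Int.mod_eq_zero_iff_dvd n d).mp hm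
        have hq := ediv_pos_lt n d hd hn hdvd
        have hfd : PySem.Int.floordiv n d = n / d := PySem.Int.floordiv_eq_ediv_of_pos (by omega)
        have hnsd : noSmallDiv (n / d) d := fun e he1 he2 hdv => hns e he1 he2 (dvd_of_dvd_ediv hdvd hdv)
        have hstep1 : innerA (n.toNat + 1) d n cnt = innerA n.toNat d (n / d) (cnt + 1) := by
          simp only [innerA, if_pos hm, hfd]
        simp only [omegaB, if_pos hdd, if_pos hm, hfd]
        rw [← ihb (fo' + 1) (n / d) d (cnt + 1) hd hnsd (by omega) (by omega)]
        -- afinA (fo'+1) d n cnt = afinA (fo'+1) d (n/d) (cnt+1)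
        unfold afinA
        simp only [outerA, if_pos hdd]
        by_cases g : d * d ≤ n / d
        · rw [if_pos g, hstep1,
              innerA_stable n.toNat ((n / d).toNat + 1) (n / d) (cnt + 1) d hd hq.1 (by omega) (by omega)]
        · rw [if_neg g]
          by_cases hm2 : d ∣ (n / d)
          · have hnd : n / d = d := eq_of_no_small_div (n / d) d hd hq.1 (by omega) hm2 hnsd
            have hp : innerA (n.toNat + 1) d n cnt = (1, cnt + 1 + 1) := by
              rw [hstep1, hnd, innerA_self n.toNat d (cnt + 1) hd (by omega)]
            rw [hp]
            obtain ⟨fo'', rfl⟩ : ∃ k, fo' = k + 1 := ⟨fo' - 1, by omega⟩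
            simp only [outerA]
            rw [if_neg (by nlinarith : ¬ (d + 1) * (d + 1) ≤ (1:Int))]
            rw [hnd]
            simp only
            split <;> split <;> omega
          · have hm2' : ¬ PySem.Int.mod (n / d) d = 0 := fun hc =>
              hm2 ((PySem.Int.mod_eq_zero_iff_dvd (n / d) d).mp hc)
            have hp : innerA (n.toNat + 1) d n cnt = (n / d, cnt + 1) := by
              rw [hstep1]
              obtain ⟨f', hf'⟩ : ∃ k, n.toNat = k + 1 := ⟨n.toNat - 1, by omega⟩
              rw [hf']
              simp only [innerA, if_neg hm2']
            rw [hp]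
            obtain ⟨fo'', rfl⟩ : ∃ k, fo' = k + 1 := ⟨fo' - 1, by omega⟩
            simp only [outerA]
            rw [if_neg (by nlinarith : ¬ (d + 1) * (d + 1) ≤ n / d)]
      · -- advance step
        have hstep : afinA (fo' + 1) d n cnt = afinA fo' (d + 1) n cnt := by
          unfold afinA
          simp only [outerA, if_pos hdd, innerA, if_neg hm]
        rw [hstep]
        simp only [omegaB, if_pos hdd, if_neg hm]
        refine ihb fo' n (d + 1) cnt (by omega) ?_ (by omega) (by omega)
        intro e he1 he2 hdv
        by_cases he : e = d
        · exact hm ((PySem.Int.mod_eq_zero_iff_dvd n d).mpr (he ▸ hdv))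
        · exact hns e he1 (by omega) hdv
    · -- loop over
      simp only [omegaB, if_neg hdd]
      unfold afinA
      simp only [outerA, if_neg hdd]

theorem le_omegaB (f : Nat) : ∀ (n d cnt : Int), cnt ≤ omegaB f n d cnt := by
  induction f with
  | zero => intro n d cnt; simp only [omegaB]; split <;> omega
  | succ f ih =>
    intro n d cnt
    simp only [omegaB]
    split
    · split
      · exact le_trans (by omega) (ih _ _ (cnt + 1))
      · exact ih _ _ cnt
    · split <;> omega

theorem omegaB_le (f : Nat) : ∀ (n d cnt : Int) (k : Nat), 2 ≤ d → 1 ≤ k → n ≤ 2 ^ k →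
    omegaB f n d cnt ≤ cnt + k := by
  induction f with
  | zero =>
    intro n d cnt k _ hk _
    simp only [omegaB]; split <;> omega
  | succ f ih =>
    intro n d cnt k hd2 hk hnk
    simp only [omegaB]
    by_cases hdd : d * d ≤ n
    · rw [if_pos hdd]
      by_cases hm : PySem.Int.mod n d = 0
      · rw [if_pos hm]
        have hdvd : d ∣ n := (PySem.Int.mod_eq_zero_iff_dvd n d).mp hm
        have hn : 0 < n := by nlinarith
        have hfd : PySem.Int.floordiv n d = n / d := PySem.Int.floordiv_eq_ediv_of_pos (by omega)
        have hk2 : 2 ≤ k := by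
          by_contra hc
          have hk1 : k = 1 := by omega
          subst hk1
          norm_num at hnk
          nlinarith
        have hq : n / d ≤ 2 ^ (k - 1) := by
          by_contra hc
          push Not at hc
          have h4 := Int.emod_nonneg n (by omega : d ≠ 0)
          have h6 := Int.mul_ediv_add_emod n d
          have hpow : (2:Int) * 2 ^ (k - 1) = 2 ^ k := by
            rw [← pow_succ']
            congr 1
            omega
          nlinarith
        have := ih (n / d) d (cnt + 1) (k - 1) hd2 (by omega) hq
        have hc : ((k - 1 : Nat) : Int) = (k : Int) - 1 := by push_cast [hk]; ring
        rw [hfd]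
        omega
      · rw [if_neg hm]
        exact ih n (d + 1) cnt k (by omega) hk hnk
    · rw [if_neg hdd]; split <;> omega

set_option maxRecDepth 4096 in
theorem sosu_small (c : Int) (h0 : 0 ≤ c) (h1 : c ≤ 31) :
    (if sosu c = some true then some true else none : Option Bool) =
    (if isPrimeB (c.toNat + 1) c 2 then some true else none) := by
  interval_cases c <;> decide

-- ===== VERDICT (by name: the statement is the Claim_ definition above) =====
theorem under_prime_spec : Claim_equal_under_prime := by
  intro n hdom
  unfold Spec_under_prime
  simp only [under_prime, under_prime_alt]
  have hrw : (if 1 < (outerA (n.toNat + 1) 2 n 0).1 then (outerA (n.toNat + 1) 2 n 0).2 + 1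
      else (outerA (n.toNat + 1) 2 n 0).2) = afinA (n.toNat + 1) 2 n 0 := by
    unfold afinA; split <;> omega
  have hmain : afinA (n.toNat + 1) 2 n 0 = omegaB (n.toNat + 1) n 2 0 :=
    afin_eq_omega (n.toNat + 1) (n.toNat + 1) n 2 0 (by omega)
      (fun e he1 he2 _ => by omega) (by omega) (by omega)
  have h0 : (0:Int) ≤ omegaB (n.toNat + 1) n 2 0 := le_omegaB (n.toNat + 1) n 2 0
  have hbound : omegaB (n.toNat + 1) n 2 0 ≤ 31 := by
    have hn : n ≤ 2 ^ (31:Nat) := by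
      unfold Dom_under_prime pvDomInt at hdom
      simp only [decide_eq_true_eq] at hdom
      norm_num
      omega
    have := omegaB_le (n.toNat + 1) n 2 0 31 (by norm_num) (by norm_num) hn
    omega
  rw [hrw, hmain]
  exact sosu_small (omegaB (n.toNat + 1) n 2 0) h0 hbound
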